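-- pv_equiv track=rewrite | github.com/GitAkash/PnD | oefententamens/extra_oefeningen/Practice_Excersises_3.py | first_lucas_numbers
-- ===== SOURCE A (Python) =====
-- def first_lucas_numbers(n):
--     list = []
--
--     def Lucas(n):
--         if n == 0:
--             return 2
--         if n == 1:
--             return 1
--         return Lucas(n - 1) + Lucas(n - 2)
--
--     for i in range(n):
--         list.append(Lucas(i))
--
--     return list
-- ===== SOURCE B (Python) =====
-- def first_lucas_numbers(n):
--     result = []
--     a, b = 2, 1
--     for _ in range(n):
--         result.append(a)
--         a, b = b, a + b
--     return result
-- ===== Notes on version B (the rewrite author's own statement) =====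
-- stated objective: faster
-- what changed: Replaces the per-index naive doubly-recursive Lucas(i) with a single iterative pass carrying the last two Lucas values; intended as asymptotically faster (a timing run saw A time out at n=16 where B returned, so no ratio could be measured).
import Mathlib
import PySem

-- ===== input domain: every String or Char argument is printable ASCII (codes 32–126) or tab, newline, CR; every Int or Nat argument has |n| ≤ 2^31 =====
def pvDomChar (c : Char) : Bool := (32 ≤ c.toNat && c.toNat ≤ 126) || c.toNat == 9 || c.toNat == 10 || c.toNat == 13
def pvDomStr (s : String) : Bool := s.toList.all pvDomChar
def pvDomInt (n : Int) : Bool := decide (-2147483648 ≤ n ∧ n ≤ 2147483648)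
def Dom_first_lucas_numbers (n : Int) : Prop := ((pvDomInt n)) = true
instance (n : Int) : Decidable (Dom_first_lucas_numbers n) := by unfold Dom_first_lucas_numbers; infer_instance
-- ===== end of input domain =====

-- B replaces A's doubly-recursive Lucas(i) per index with one iterative pass carrying the last
-- two values; intended as faster (timing: A timed out already at n=16 where B returned).

-- ===== PORT A =====
-- A's inner helper Lucas: naive double recursion (called by A only on the nonnegative
-- indices produced by range(n), so ported on Nat).
def lucasRec : Nat → Int
  | 0 => 2
  | 1 => 1
  | n + 2 => lucasRec (n + 1) + lucasRec n

def first_lucas_numbers (n : Int) : List Int :=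
  (PySem.List.pyRange 0 n 1).foldl (fun acc i => acc ++ [lucasRec i.toNat]) []

-- ===== PORT B =====
def lucasGo : Nat → Int → Int → List Int
  | 0, _, _ => []
  | k + 1, a, b => a :: lucasGo k b (a + b)

def first_lucas_numbers_alt (n : Int) : List Int :=
  lucasGo n.toNat 2 1

-- ===== PRECONDITION & SPEC =====
def Spec_first_lucas_numbers (n : Int) (out : List Int) : Prop := out = first_lucas_numbers_alt n
instance (n : Int) (out : List Int) : Decidable (Spec_first_lucas_numbers n out) := by unfold Spec_first_lucas_numbers; infer_instance

-- ===== CLAIM (what is proved, stated in full; the proofs are below) =====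
def Claim_equal_first_lucas_numbers : Prop := ∀ (n : Int), Dom_first_lucas_numbers n → Spec_first_lucas_numbers n (first_lucas_numbers n)

-- ===== LEMMAS AND PROOFS =====

theorem foldl_append_map {α β : Type} (f : α → β) :
    ∀ (l : List α) (acc : List β), l.foldl (fun acc i => acc ++ [f i]) acc = acc ++ l.map f := by
  intro l
  induction l with
  | nil => simp [List.foldl]
  | cons x xs ih => intro acc; simp [List.foldl, ih]

theorem lucasGo_eq_map_range :
    ∀ (m k : Nat), lucasGo m (lucasRec k) (lucasRec (k + 1)) = (List.range m).map (fun i => lucasRec (k + i)) := by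
  intro m
  induction m with
  | zero => intro k; simp [lucasGo]
  | succ m ih =>
    intro k
    have h2 : lucasRec (k + 1) + lucasRec k = lucasRec (k + 2) := by
      simp [lucasRec]
    rw [List.range_succ_eq_map]
    simp only [lucasGo, List.map_cons, List.map_map]
    rw [show lucasRec k + lucasRec (k + 1) = lucasRec (k + 1 + 1) from by
      simp [lucasRec]; ring]
    rw [ih (k + 1)]
    refine congrArg₂ _ (by simp) ?_
    congr 1
    funext i
    simp [Function.comp]
    congr 1
    omega

theorem first_lucas_numbers_spec : Claim_equal_first_lucas_numbers := by
  intro n _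
  unfold Spec_first_lucas_numbers first_lucas_numbers first_lucas_numbers_alt
  rw [foldl_append_map, PySem.List.pyRange_one]
  have h := lucasGo_eq_map_range n.toNat 0
  simp only [lucasRec] at h
  rw [show (n - 0).toNat = n.toNat by omega]
  rw [h]
  simp [Function.comp]
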